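-- pv_equiv track=rewrite | github.com/Dr-Tarte-au-Quetsche/Morpion-3000 | fonctions_morpion.py | affiche_grille_numpad
-- ===== SOURCE A (Python) =====
-- def affiche_grille_numpad(titre,tableau) :
--     grille= f"{titre}\n-------------\n"       #Affichage du menu
--     compteur = 0
--     for element in tableau:
--             compteur += 1
--             grille+= "| "+str(element) + " "
--             if compteur > 2 :
--                 grille += "|\n-------------\n"
--                 compteur = 0
--     return grille
-- ===== SOURCE B (Python) =====
-- def affiche_grille_numpad(titre, tableau):
--     rows = []
--     for i in range(0, len(tableau), 3):
--         chunk = tableau[i:i+3]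
--         row = ''.join('| ' + str(e) + ' ' for e in chunk)
--         if len(chunk) == 3:
--             row += '|\n-------------\n'
--         rows.append(row)
--     return f"{titre}\n-------------\n" + ''.join(rows)
-- ===== Notes on version B (the rewrite author's own statement) =====
-- stated objective: alternative
-- what changed: B groups the table into 3-element chunks and builds the grid row-by-row (joining each chunk's cells and closing only full rows), instead of A's single element loop with a reset counter.
import Mathlib
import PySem

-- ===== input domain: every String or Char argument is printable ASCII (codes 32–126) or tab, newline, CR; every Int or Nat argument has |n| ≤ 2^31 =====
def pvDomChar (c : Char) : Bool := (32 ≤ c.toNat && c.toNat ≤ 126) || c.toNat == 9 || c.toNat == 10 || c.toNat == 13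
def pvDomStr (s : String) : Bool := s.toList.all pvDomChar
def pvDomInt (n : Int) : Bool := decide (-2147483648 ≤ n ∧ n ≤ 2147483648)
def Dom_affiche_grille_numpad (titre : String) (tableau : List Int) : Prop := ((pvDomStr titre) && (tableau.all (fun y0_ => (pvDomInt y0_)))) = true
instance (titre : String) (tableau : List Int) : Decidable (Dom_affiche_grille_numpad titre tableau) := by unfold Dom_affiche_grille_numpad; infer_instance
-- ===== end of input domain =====

-- B builds the grid row-by-row from 3-element chunks instead of A's element loop with a reset counter; objective: alternative decomposition, same cost.


-- ===== PORT A =====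
-- the body of A's for-loop, acting on the state (grille, compteur)
def pvStepA (st : String × Int) (element : Int) : String × Int :=
  let compteur := st.2 + 1
  let grille := st.1 ++ "| " ++ PySem.Int.toStr element ++ " "
  if compteur > 2 then (grille ++ "|\n-------------\n", 0) else (grille, compteur)

def affiche_grille_numpad (titre : String) (tableau : List Int) : String :=
  (tableau.foldl pvStepA (titre ++ "\n-------------\n", (0 : Int))).1

-- ===== PORT B =====
-- one row: the joined cells of a chunk, closed by the separator only when the chunk is full
def pvRow (chunk : List Int) : String :=
  String.join (chunk.map (fun e => "| " ++ PySem.Int.toStr e ++ " ")) ++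
    (if chunk.length = 3 then "|\n-------------\n" else "")

-- the concatenated rows, taking the cells three at a time
def pvRowsCat : List Int → String
  | [] => ""
  | [a] => pvRow [a]
  | [a, b] => pvRow [a, b]
  | a :: b :: c :: rest => pvRow [a, b, c] ++ pvRowsCat rest

def affiche_grille_numpad_alt (titre : String) (tableau : List Int) : String :=
  titre ++ "\n-------------\n" ++ pvRowsCat tableau

-- ===== PRECONDITION & SPEC =====
def Spec_affiche_grille_numpad (titre : String) (tableau : List Int) (out : String) : Prop := out = affiche_grille_numpad_alt titre tableau
instance (titre : String) (tableau : List Int) (out : String) : Decidable (Spec_affiche_grille_numpad titre tableau out) := by unfold Spec_affiche_grille_numpad; infer_instance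

-- ===== CLAIM (what is proved, stated in full; the proofs are below) =====
def Claim_equal_affiche_grille_numpad : Prop := ∀ (titre : String) (tableau : List Int), Dom_affiche_grille_numpad titre tableau → Spec_affiche_grille_numpad titre tableau (affiche_grille_numpad titre tableau)

-- ===== LEMMAS AND PROOFS =====
-- A's loop, started from any accumulated string with counter 0, appends exactly B's chunked rows
lemma pvFold_eq_rows (l : List Int) : ∀ g : String,
    (l.foldl pvStepA (g, (0 : Int))).1 = g ++ pvRowsCat l := by
  induction l using pvRowsCat.induct with
  | case1 => intro g; simp [pvRowsCat]
  | case2 a => intro g; simp [pvStepA, pvRowsCat, pvRow, String.join, ← String.append_assoc]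
  | case3 a b => intro g; simp [pvStepA, pvRowsCat, pvRow, String.join, ← String.append_assoc]
  | case4 a b c rest ih =>
      intro g
      have h : List.foldl pvStepA (g, (0 : Int)) (a :: b :: c :: rest)
          = List.foldl pvStepA
              (g ++ "| " ++ PySem.Int.toStr a ++ " " ++ "| " ++ PySem.Int.toStr b ++ " "
                ++ "| " ++ PySem.Int.toStr c ++ " " ++ "|\n-------------\n", (0 : Int)) rest := rfl
      rw [h, ih]
      simp [pvRowsCat, pvRow, String.join, ← String.append_assoc]

-- ===== VERDICT (by name: the statement is the Claim_ definition above) =====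
theorem affiche_grille_numpad_spec : Claim_equal_affiche_grille_numpad := by
  intro titre tableau _
  unfold Spec_affiche_grille_numpad affiche_grille_numpad affiche_grille_numpad_alt
  rw [pvFold_eq_rows]
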